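-- pv_equiv track=rewrite | github.com/kangning-huang/tesla_robotaxi_mile_per_incident_tracker | scripts/scrape_fleet_growth.py | deduplicate_by_date
-- ===== SOURCE A (Python) =====
-- def deduplicate_by_date(data: list) -> list:
--     """Remove duplicate entries, keeping the most complete per date."""
--     by_date = {}
--     for item in data:
--         date = item.get("date")
--         if not date:
--             continue
--         if date not in by_date:
--             by_date[date] = item
--         else:
--             existing = by_date[date]
--             new_vals = sum(1 for v in item.values() if v is not None)
--             old_vals = sum(1 for v in existing.values() if v is not None)
--             if new_vals > old_vals:
--                 by_date[date] = item
--     return sorted(by_date.values(), key=lambda x: x["date"])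
-- ===== SOURCE B (Python) =====
-- def _non_null(item):
--     n = 0
--     for v in item.values():
--         if v is not None:
--             n += 1
--     return n
--
--
-- def deduplicate_by_date(data: list) -> list:
--     """Remove duplicate entries, keeping the most complete per date."""
--     dated = sorted((item for item in data if item.get("date")),
--                    key=lambda x: x["date"])
--     result = []
--     best = None
--     for item in dated:
--         if best is None or item["date"] != best["date"]:
--             if best is not None:
--                 result.append(best)
--             best = item
--         elif _non_null(item) > _non_null(best):
--             best = item
--     if best is not None:
--         result.append(best)
--     return result
-- ===== Notes on version B (the rewrite author's own statement) =====
-- stated objective: alternative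
-- what changed: Replaces A's date-keyed dict accumulation followed by a sort of the dict values with: drop falsy-date items, stably sort them by date, then emit the most complete item of each date group in a single pass (strict > keeps the earliest on ties, matching A's dict update rule).
import Mathlib
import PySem

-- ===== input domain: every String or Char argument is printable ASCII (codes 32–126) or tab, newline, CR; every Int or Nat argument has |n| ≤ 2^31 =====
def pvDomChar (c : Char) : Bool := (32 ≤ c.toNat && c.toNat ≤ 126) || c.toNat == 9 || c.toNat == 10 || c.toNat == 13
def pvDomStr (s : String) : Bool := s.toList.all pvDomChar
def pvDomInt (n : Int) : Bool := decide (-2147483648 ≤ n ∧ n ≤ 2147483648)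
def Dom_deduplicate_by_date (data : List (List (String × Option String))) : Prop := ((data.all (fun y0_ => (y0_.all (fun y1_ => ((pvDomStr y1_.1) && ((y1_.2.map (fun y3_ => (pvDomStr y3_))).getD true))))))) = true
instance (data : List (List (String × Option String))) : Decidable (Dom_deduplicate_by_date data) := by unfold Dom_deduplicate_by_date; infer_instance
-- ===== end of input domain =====

-- B: instead of A's date-keyed dict + final sort, filter out falsy-date items, stably sort by date, and emit the most complete item of each date group in one pass (alternative decomposition, same result).


-- shared helpers: these Python expressions occur verbatim in BOTH sources.
-- sum(1 for v in item.values() if v is not None)  (B spells it as the explicit loop `_non_null`)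
def nonNullCount (item : List (String × Option String)) : Int :=
  ((PySem.Dict.mk item).values).foldl (fun n v => if v ≠ none then n + 1 else n) 0

-- x["date"]: both programs apply it only to items whose "date" key holds a nonempty string, so the "" fallback is unreachable there
def pyDateStr (x : List (String × Option String)) : String :=
  match (PySem.Dict.mk x).get? "date" with
  | some (some s) => s
  | _ => ""

-- ===== PORT A =====
-- loop body of A's `for item in data`
def stepA (by_date : PySem.Dict String (List (String × Option String)))
    (item : List (String × Option String)) : PySem.Dict String (List (String × Option String)) :=
  match ((PySem.Dict.mk item).get? "date").join with   -- date = item.get("date")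
  | none => by_date                                    -- `if not date: continue` (None)
  | some date =>
    if date = "" then by_date                          -- `if not date: continue` ("")
    else if !by_date.contains date then by_date.insert date item
    else
      let existing := by_date.getD date []             -- by_date[date]; the key is present on this branch
      let new_vals := nonNullCount item
      let old_vals := nonNullCount existing
      if new_vals > old_vals then by_date.insert date item else by_date

def deduplicate_by_date (data : List (List (String × Option String))) : List (List (String × Option String)) :=
  let by_date := data.foldl stepA PySem.Dict.empty
  PySem.List.sorted by_date.values (fun x => pyDateStr x) false

-- ===== PORT B =====
def hasDate (item : List (String × Option String)) : Bool :=   -- `if item.get("date")`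
  match ((PySem.Dict.mk item).get? "date").join with
  | none => false
  | some s => s != ""

-- loop body of B's `for item in dated`, state = (result, best)
def stepB (st : List (List (String × Option String)) × Option (List (String × Option String)))
    (item : List (String × Option String)) :
    List (List (String × Option String)) × Option (List (String × Option String)) :=
  match st.2 with
  | none => (st.1, some item)
  | some best =>
    if pyDateStr item ≠ pyDateStr best then (st.1 ++ [best], some item)
    else if nonNullCount item > nonNullCount best then (st.1, some item)
    else st

def deduplicate_by_date_alt (data : List (List (String × Option String))) : List (List (String × Option String)) :=
  let dated := PySem.List.sorted (data.filter hasDate) (fun x => pyDateStr x) false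
  let st := dated.foldl stepB ([], none)
  match st.2 with
  | none => st.1
  | some best => st.1 ++ [best]

-- ===== PRECONDITION & SPEC =====
def Spec_deduplicate_by_date (data : List (List (String × Option String))) (out : List (List (String × Option String))) : Prop := out = deduplicate_by_date_alt data
instance (data : List (List (String × Option String))) (out : List (List (String × Option String))) : Decidable (Spec_deduplicate_by_date data out) := by unfold Spec_deduplicate_by_date; infer_instance

-- ===== CLAIM (what is proved, stated in full; the proofs are below) =====
def Claim_equal_deduplicate_by_date : Prop := ∀ (data : List (List (String × Option String))), Dom_deduplicate_by_date data → Spec_deduplicate_by_date data (deduplicate_by_date data)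

-- ===== LEMMAS AND PROOFS =====

-- the truthy date of an item, if any
def dk (item : List (String × Option String)) : Option String :=
  match ((PySem.Dict.mk item).get? "date").join with
  | none => none
  | some s => if s = "" then none else some s

-- running "most complete" choice, strict `>` so the first item wins ties
def bestStep (b : Option (List (String × Option String))) (item : List (String × Option String)) :
    Option (List (String × Option String)) :=
  match b with
  | none => some item
  | some e => if nonNullCount item > nonNullCount e then some item else b

def bestOf (l : List (List (String × Option String))) : Option (List (String × Option String)) :=
  l.foldl bestStep none

-- the item A's dict holds at date d after processing `data`
def gsel (data : List (List (String × Option String))) (d : String) : List (String × Option String) :=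
  (bestOf (data.filter (fun it => dk it == some d))).getD []

-- B's final `if best is not None: result.append(best)`
def finB (st : List (List (String × Option String)) × Option (List (String × Option String))) :
    List (List (String × Option String)) :=
  match st.2 with
  | none => st.1
  | some b => st.1 ++ [b]

theorem hasDate_eq_isSome (item : List (String × Option String)) : hasDate item = (dk item).isSome := by
  unfold hasDate dk
  cases h : ((PySem.Dict.mk item).get? "date").join with
  | none => simp
  | some s => by_cases hs : s = "" <;> simp [hs]

theorem dk_eq_some (item : List (String × Option String)) (d : String) (h : dk item = some d) :
    pyDateStr item = d ∧ d ≠ "" := by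
  unfold dk at h
  cases hj : ((PySem.Dict.mk item).get? "date").join with
  | none => rw [hj] at h; simp at h
  | some s =>
    rw [hj] at h
    by_cases hs : s = "" <;> simp [hs] at h
    subst h
    refine ⟨?_, hs⟩
    rcases Option.join_eq_some_iff.mp hj with hg
    unfold pyDateStr
    rw [hg]

theorem filterMap_dk (l : List (List (String × Option String))) :
    l.filterMap dk = (l.filter hasDate).map pyDateStr := by
  induction l with
  | nil => rfl
  | cons x t ih =>
    rw [List.filterMap_cons, List.filter_cons]
    cases hx : dk x with
    | none => simp [hasDate_eq_isSome, hx, ih]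
    | some d => simp [hasDate_eq_isSome, hx, ih, (dk_eq_some x d hx).1]

theorem foldl_bestStep_some (l : List (List (String × Option String)))
    (b : List (String × Option String)) :
    ∃ b', l.foldl bestStep (some b) = some b' ∧ b' ∈ b :: l := by
  induction l generalizing b with
  | nil => exact ⟨b, rfl, by simp⟩
  | cons x t ih =>
    rw [List.foldl_cons]
    show ∃ b', List.foldl bestStep (bestStep (some b) x) t = some b' ∧ _
    unfold bestStep
    by_cases h : nonNullCount x > nonNullCount b <;> simp only [h, if_pos, if_neg, not_false_iff]
    · rcases ih x with ⟨b', h1, h2⟩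
      exact ⟨b', by simpa [h] using h1, by simp at h2 ⊢; tauto⟩
    · rcases ih b with ⟨b', h1, h2⟩
      exact ⟨b', by simpa [h] using h1, by simp at h2 ⊢; tauto⟩

theorem bestOf_some (l : List (List (String × Option String))) (h : l ≠ []) :
    ∃ b, bestOf l = some b ∧ b ∈ l := by
  cases l with
  | nil => exact absurd rfl h
  | cons x t =>
    unfold bestOf
    rw [List.foldl_cons]
    show ∃ b, List.foldl bestStep (some x) t = some b ∧ _
    rcases foldl_bestStep_some t x with ⟨b, h1, h2⟩
    exact ⟨b, h1, h2⟩

theorem insertBy_middle {α : Type} (before : α → α → Bool) (x : α) (ys zs : List α)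
    (h1 : ∀ y ∈ ys, before x y = false) (h2 : ∀ z ∈ zs, before x z = true) :
    PySem.List.insertBy before x (ys ++ zs) = ys ++ x :: zs := by
  induction ys with
  | nil =>
    cases zs with
    | nil => rfl
    | cons z t =>
      simp only [List.nil_append]
      unfold PySem.List.insertBy
      rw [h2 z (by simp), if_pos rfl]
  | cons y t ih =>
    simp only [List.cons_append]
    unfold PySem.List.insertBy
    rw [h1 y (by simp), if_neg (by simp)]
    rw [ih (fun y hy => h1 y (by simp [hy]))]

theorem pairwise_filter_split (D : List String) (a : String) (hp : D.Pairwise (· < ·)) (ha : a ∉ D) :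
    D = D.filter (fun d => decide (d < a)) ++ D.filter (fun d => decide (a < d)) := by
  induction D with
  | nil => rfl
  | cons d t ih =>
    have hd : d ≠ a := fun h => ha (h ▸ List.mem_cons_self ..)
    rw [List.pairwise_cons] at hp
    have ha' : a ∉ t := fun h => ha (List.mem_cons_of_mem _ h)
    rcases lt_or_gt_of_ne hd with h | h
    · rw [List.filter_cons_of_pos (by simpa using h),
        List.filter_cons_of_neg (by simp only [decide_eq_true_eq]; exact asymm h)]
      simpa using ih hp.2 ha'
    · have hgt : ∀ y ∈ d :: t, a < y := by
        intro y hy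
        rcases List.mem_cons.mp hy with rfl | hy
        · exact h
        · exact lt_trans h (hp.1 y hy)
      rw [List.filter_eq_nil_iff.mpr (fun y hy => by simp only [decide_eq_true_eq]; exact asymm (hgt y hy)),
        List.filter_eq_self.mpr (fun y hy => by simpa using hgt y hy)]
      simp

theorem join_of_dk (item : List (String × Option String)) (a : String) (h : dk item = some a) :
    ((PySem.Dict.mk item).get? "date").join = some a := by
  unfold dk at h
  cases hj : ((PySem.Dict.mk item).get? "date").join with
  | none => rw [hj] at h; simp at h
  | some s =>
    rw [hj] at h
    by_cases hs : s = "" <;> simp [hs] at h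
    rw [h]

theorem stepA_none (bd : PySem.Dict String (List (String × Option String)))
    (x : List (String × Option String)) (h : dk x = none) : stepA bd x = bd := by
  unfold stepA
  unfold dk at h
  cases hj : ((PySem.Dict.mk x).get? "date").join with
  | none => rfl
  | some s =>
    rw [hj] at h
    by_cases hs : s = "" <;> simp [hs] at h
    simp [hs]

theorem bestOf_append (g : List (List (String × Option String))) (x : List (String × Option String)) :
    bestOf (g ++ [x]) = bestStep (bestOf g) x := by
  simp [bestOf, List.foldl_append]

theorem gsel_append_ne (l : List (List (String × Option String))) (x : List (String × Option String))
    (d : String) (h : dk x ≠ some d) : gsel (l ++ [x]) d = gsel l d := by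
  unfold gsel
  rw [List.filter_append, List.filter_singleton]
  have hb : (dk x == some d) = false := by simpa using h
  rw [hb, cond_false, List.append_nil]

theorem gsel_append_eq (l : List (List (String × Option String))) (x : List (String × Option String))
    (d : String) (h : dk x = some d) :
    gsel (l ++ [x]) d = (bestStep (bestOf (l.filter (fun it => dk it == some d))) x).getD [] := by
  unfold gsel
  rw [List.filter_append, List.filter_singleton]
  have hb : (dk x == some d) = true := by simp [h]
  rw [hb, cond_true, bestOf_append]

theorem ofList_append_singleton {α : Type} [BEq α] [LawfulBEq α] (m : List α) (a : α) :
    PySem.Set.ofList (m ++ [a])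
      = if a ∈ PySem.Set.ofList m then PySem.Set.ofList m else PySem.Set.ofList m ++ [a] := by
  show List.foldl PySem.Set.add PySem.Set.empty (m ++ [a]) = _
  rw [List.foldl_append]
  show PySem.Set.add (PySem.Set.ofList m) a = _
  unfold PySem.Set.add
  by_cases h : a ∈ PySem.Set.ofList m
  · rw [if_pos (by simpa [PySem.Set.contains] using h), if_pos h]
  · rw [if_neg (by simpa [PySem.Set.contains] using h), if_neg h]

theorem flatMap_congr_mem {α β : Type} (s : List α) (f g : α → List β)
    (h : ∀ d ∈ s, f d = g d) : s.flatMap f = s.flatMap g := by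
  induction s with
  | nil => rfl
  | cons d t ih =>
    rw [List.flatMap_cons, List.flatMap_cons, h d (by simp),
      ih (fun d hd => h d (by simp [hd]))]

theorem mem_filterMap_dk (l : List (List (String × Option String))) (a : String) :
    a ∈ l.filterMap dk ↔ ∃ it ∈ l, dk it = some a := List.mem_filterMap

theorem dictA_items (data : List (List (String × Option String))) :
    (data.foldl stepA PySem.Dict.empty).items
      = (PySem.Set.ofList (data.filterMap dk)).map (fun d => (d, gsel data d)) := by
  induction data using List.reverseRecOn with
  | nil => rfl
  | append_singleton l x ih =>
    rw [List.foldl_append, List.foldl_cons, List.foldl_nil, List.filterMap_append]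
    cases hx : dk x with
    | none =>
      rw [stepA_none _ x hx, ih]
      have hfm : List.filterMap dk [x] = [] := by simp [hx]
      rw [hfm, List.append_nil]
      exact List.map_congr_left (fun d hd => by rw [gsel_append_ne l x d (by simp [hx])])
    | some a =>
      have hja := join_of_dk x a hx
      have hane : a ≠ "" := (dk_eq_some x a hx).2
      have hfm : List.filterMap dk [x] = [a] := by simp [hx]
      rw [hfm]
      obtain ⟨bd, hbd⟩ : ∃ bd, l.foldl stepA PySem.Dict.empty = bd := ⟨_, rfl⟩
      rw [hbd] at ih ⊢
      have hkeys : bd.keys = PySem.Set.ofList (l.filterMap dk) := by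
        show bd.items.map (fun p => p.1) = _
        rw [ih, List.map_map]
        simp [Function.comp_def]
      have hnodup : bd.keys.Nodup := by
        rw [hkeys]; exact PySem.Set.nodup_ofList _
      unfold stepA
      rw [hja]
      simp only [if_neg hane]
      rw [PySem.Dict.contains_eq_decide_mem_keys, hkeys]
      by_cases hmem : a ∈ PySem.Set.ofList (l.filterMap dk)
      · simp only [hmem, decide_true, Bool.not_true, Bool.false_eq_true, if_false]
        have hex : bd.getD a [] = gsel l a := by
          refine PySem.Dict.getD_of_mem_items bd ?_ hnodup []
          rw [ih]
          exact List.mem_map_of_mem hmem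
        rw [hex]
        have hset : PySem.Set.ofList (l.filterMap dk ++ [a]) = PySem.Set.ofList (l.filterMap dk) := by
          rw [ofList_append_singleton, if_pos hmem]
        rw [hset]
        have hanel : ∃ it ∈ l, dk it = some a := (mem_filterMap_dk l a).mp ((PySem.Set.mem_ofList _ _).mp hmem)
        obtain ⟨it, hit, hdkit⟩ := hanel
        obtain ⟨b, hb, hbmem⟩ := bestOf_some (l.filter (fun it => dk it == some a))
          (List.ne_nil_of_mem (List.mem_filter.mpr ⟨hit, by simp [hdkit]⟩))
        have hgb : gsel l a = b := by unfold gsel; rw [hb]; rfl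
        by_cases hc : nonNullCount x > nonNullCount (gsel l a)
        · rw [if_pos hc]
          rw [PySem.Dict.items_insert_of_contains bd x
            (by rw [PySem.Dict.contains_eq_decide_mem_keys, hkeys]; simp [hmem])]
          rw [ih, List.map_map]
          refine List.map_congr_left (fun d hd => ?_)
          by_cases hda : d = a
          · subst hda
            simp only [Function.comp_apply, beq_self_eq_true, if_pos]
            rw [gsel_append_eq l x d hx, hb]
            unfold bestStep
            rw [hgb] at hc
            simp [hc]
          · rw [gsel_append_ne l x d (by simp [hx]; exact fun h => hda h.symm)]
            simp [hda]
        · rw [if_neg hc]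
          rw [ih]
          refine List.map_congr_left (fun d hd => ?_)
          by_cases hda : d = a
          · subst hda
            rw [gsel_append_eq l x d hx, hb]
            unfold bestStep
            rw [hgb] at hc
            simp [hc, hgb]
          · rw [gsel_append_ne l x d (by simp [hx]; exact fun h => hda h.symm)]
      · simp only [hmem, decide_false, Bool.not_false, if_true]
        rw [PySem.Dict.items_insert_of_not_contains bd x
          (by rw [PySem.Dict.contains_eq_decide_mem_keys, hkeys]; simp [hmem])]
        rw [ofList_append_singleton, if_neg hmem, List.map_append, ih]
        congr 1
        · refine List.map_congr_left (fun d hd => ?_)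
          have hda : d ≠ a := fun h => hmem (h ▸ hd)
          rw [gsel_append_ne l x d (by simp [hx]; exact fun h => hda h.symm)]
        · have hempty : l.filter (fun it => dk it == some a) = [] := by
            rw [List.filter_eq_nil_iff]
            intro it hit
            simp only [beq_iff_eq]
            intro hdk
            exact hmem ((PySem.Set.mem_ofList _ _).mpr ((mem_filterMap_dk l a).mpr ⟨it, hit, hdk⟩))
          simp only [List.map_cons, List.map_nil]
          rw [gsel_append_eq l x a hx, hempty]
          rfl

theorem sorted_flatMap_groups {α : Type} (k : α → String) (l : List α) :
    PySem.List.sorted l (fun y => k y) false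
      = (PySem.List.sorted (PySem.Set.ofList (l.map k)) (fun d : String => d) false).flatMap
          (fun d => l.filter (fun it => k it == d)) := by
  induction l using List.reverseRecOn with
  | nil => rfl
  | append_singleton l x ih =>
    have hsnoc : PySem.List.sorted (l ++ [x]) (fun y => k y) false
        = PySem.List.insertBy (fun a b => decide (k a < k b)) x
            (PySem.List.sorted l (fun y => k y) false) := by
      rw [PySem.List.sorted_eq_foldl_insertBy (l ++ [x]) (fun y => k y),
        PySem.List.sorted_eq_foldl_insertBy l (fun y => k y), List.foldl_append,
        List.foldl_cons, List.foldl_nil]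
    rw [hsnoc, ih, List.map_append]
    simp only [List.map_cons, List.map_nil]
    have hDp := PySem.List.sorted_ofList_pairwise_lt (l.map k)
    have hDperm := PySem.List.sorted_perm (PySem.Set.ofList (l.map k)) (fun d : String => d) false
    have hgk : ∀ d : String, ∀ y ∈ l.filter (fun it => k it == d), k y = d :=
      fun d y hy => by simpa using (List.mem_filter.mp hy).2
    have hgrp_ne : ∀ d : String, d ≠ k x →
        (l ++ [x]).filter (fun it => k it == d) = l.filter (fun it => k it == d) := by
      intro d hd
      rw [List.filter_append, List.filter_singleton]
      have hf : (k x == d) = false := beq_eq_false_iff_ne.mpr (fun h => hd h.symm)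
      rw [hf, cond_false, List.append_nil]
    have hgrp_eq : (l ++ [x]).filter (fun it => k it == k x)
        = l.filter (fun it => k it == k x) ++ [x] := by
      rw [List.filter_append, List.filter_singleton]
      have hf : (k x == k x) = true := beq_self_eq_true _
      rw [hf, cond_true]
    by_cases hmem : k x ∈ PySem.Set.ofList (l.map k)
    · rw [ofList_append_singleton, if_pos hmem]
      have haD : k x ∈ PySem.List.sorted (PySem.Set.ofList (l.map k)) (fun d : String => d) false :=
        hDperm.mem_iff.mpr hmem
      obtain ⟨s, t, hst⟩ := List.append_of_mem haD
      rw [hst]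
      have hp2 : (s ++ k x :: t).Pairwise (· < ·) := hst ▸ hDp
      have hps := List.pairwise_append.mp hp2
      have hs_lt : ∀ y ∈ s, y < k x := fun y hy => hps.2.2 y hy (k x) (by simp)
      have ht_gt : ∀ z ∈ t, k x < z := fun z hz => (List.pairwise_cons.mp hps.2.1).1 z hz
      rw [List.flatMap_append, List.flatMap_cons, List.flatMap_append, List.flatMap_cons,
        ← List.append_assoc, ← List.append_assoc]
      rw [insertBy_middle (fun a b => decide (k a < k b)) x
        (s.flatMap (fun d => l.filter (fun it => k it == d)) ++ l.filter (fun it => k it == k x))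
        (t.flatMap (fun d => l.filter (fun it => k it == d)))
        (by
          intro y hy
          rcases List.mem_append.mp hy with hy' | hy'
          · obtain ⟨d, hd, hyd⟩ := List.mem_flatMap.mp hy'
            have : k y = d := hgk d y hyd
            simp only [decide_eq_false_iff_not, this]
            exact not_lt.mpr (le_of_lt (hs_lt d hd))
          · have : k y = k x := hgk (k x) y hy'
            simp only [decide_eq_false_iff_not, this]
            exact lt_irrefl _)
        (by
          intro z hz
          obtain ⟨d, hd, hzd⟩ := List.mem_flatMap.mp hz
          have : k z = d := hgk d z hzd
          simp only [decide_eq_true_eq, this]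
          exact ht_gt d hd)]
      rw [flatMap_congr_mem s _ (fun d => l.filter (fun it => k it == d))
        (fun d hd => hgrp_ne d (ne_of_lt (hs_lt d hd))),
        flatMap_congr_mem t _ (fun d => l.filter (fun it => k it == d))
        (fun d hd => hgrp_ne d (ne_of_gt (ht_gt d hd))),
        hgrp_eq]
      simp
    · rw [ofList_append_singleton, if_neg hmem]
      have haD : k x ∉ PySem.List.sorted (PySem.Set.ofList (l.map k)) (fun d : String => d) false :=
        fun h => hmem (hDperm.mem_iff.mp h)
      obtain ⟨D1, D2, hDeq, hD1, hD2⟩ : ∃ D1 D2,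
          PySem.List.sorted (PySem.Set.ofList (l.map k)) (fun d : String => d) false = D1 ++ D2
            ∧ (∀ y ∈ D1, y < k x) ∧ (∀ z ∈ D2, k x < z) := by
        refine ⟨_, _, pairwise_filter_split _ _ hDp haD, ?_, ?_⟩ <;>
          · intro y hy
            simpa using List.of_mem_filter hy
      have hDpp : (D1 ++ D2).Pairwise (· < ·) := hDeq ▸ hDp
      have hpp := List.pairwise_append.mp hDpp
      have hsorted' : PySem.List.sorted (PySem.Set.ofList (l.map k) ++ [k x]) (fun d : String => d) false
          = D1 ++ k x :: D2 := by
        apply PySem.List.sorted_eq_of_perm_of_pairwise_lt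
        · refine List.Perm.trans List.perm_middle ?_
          rw [← hDeq]
          exact (hDperm.cons (k x)).trans
            (List.perm_append_comm (l₁ := [k x]) (l₂ := PySem.Set.ofList (l.map k)))
        · apply List.pairwise_append.mpr
          refine ⟨hpp.1, ?_, ?_⟩
          · rw [List.pairwise_cons]
            exact ⟨fun z hz => hD2 z hz, hpp.2.1⟩
          · intro y hy z hz
            rcases List.mem_cons.mp hz with rfl | hz'
            · exact hD1 y hy
            · exact lt_trans (hD1 y hy) (hD2 z hz')
      rw [hDeq, hsorted']
      have hempty : l.filter (fun it => k it == k x) = [] := by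
        rw [List.filter_eq_nil_iff]
        intro it hit h
        refine hmem ((PySem.Set.mem_ofList _ _).mpr ?_)
        exact List.mem_map.mpr ⟨it, hit, by simpa using h⟩
      rw [List.flatMap_append, List.flatMap_append, List.flatMap_cons]
      rw [insertBy_middle (fun a b => decide (k a < k b)) x
        (D1.flatMap (fun d => l.filter (fun it => k it == d)))
        (D2.flatMap (fun d => l.filter (fun it => k it == d)))
        (by
          intro y hy
          obtain ⟨d, hd, hyd⟩ := List.mem_flatMap.mp hy
          have : k y = d := hgk d y hyd
          simp only [decide_eq_false_iff_not, this]
          exact not_lt.mpr (le_of_lt (hD1 d hd)))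
        (by
          intro z hz
          obtain ⟨d, hd, hzd⟩ := List.mem_flatMap.mp hz
          have : k z = d := hgk d z hzd
          simp only [decide_eq_true_eq, this]
          exact hD2 d hd)]
      rw [flatMap_congr_mem D1 _ (fun d => l.filter (fun it => k it == d))
        (fun d hd => hgrp_ne d (ne_of_lt (hD1 d hd))),
        flatMap_congr_mem D2 _ (fun d => l.filter (fun it => k it == d))
        (fun d hd => hgrp_ne d (ne_of_gt (hD2 d hd))),
        hgrp_eq, hempty]
      simp

theorem foldB_group_run (g : List (List (String × Option String)))
    (res : List (List (String × Option String))) (b : List (String × Option String))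
    (hg : ∀ it ∈ g, pyDateStr it = pyDateStr b) :
    g.foldl stepB (res, some b) = (res, g.foldl bestStep (some b)) := by
  induction g generalizing b with
  | nil => rfl
  | cons it t ih =>
    rw [List.foldl_cons, List.foldl_cons]
    have hk : pyDateStr it = pyDateStr b := hg it (by simp)
    by_cases hnn : nonNullCount it > nonNullCount b
    · have hred : stepB (res, some b) it = (res, some it) := by simp [stepB, hk, hnn]
      have hbs : bestStep (some b) it = some it := by simp [bestStep, hnn]
      rw [hred, hbs]
      exact ih it (fun it' h => (hg it' (List.mem_cons_of_mem _ h)).trans hk.symm)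
    · have hred : stepB (res, some b) it = (res, some b) := by simp [stepB, hk, hnn]
      have hbs : bestStep (some b) it = some b := by simp [bestStep, hnn]
      rw [hred, hbs]
      exact ih b (fun it' h => hg it' (List.mem_cons_of_mem _ h))

theorem foldB_groups (D : List String) (f : String → List (List (String × Option String)))
    (res : List (List (String × Option String))) (cur : Option (List (String × Option String)))
    (hD : D.Nodup)
    (hf : ∀ d ∈ D, f d ≠ [] ∧ ∀ it ∈ f d, pyDateStr it = d)
    (hcur : ∀ b, cur = some b → pyDateStr b ∉ D) :
    finB ((D.flatMap f).foldl stepB (res, cur))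
      = finB (res, cur) ++ D.map (fun d => (bestOf (f d)).getD []) := by
  induction D generalizing res cur with
  | nil => simp [finB]
  | cons d t ih =>
    obtain ⟨hne, hkey⟩ := hf d (by simp)
    obtain ⟨i0, g, hfd⟩ : ∃ i0 g, f d = i0 :: g := by
      cases hfd : f d with
      | nil => exact absurd hfd hne
      | cons i0 g => exact ⟨i0, g, rfl⟩
    rw [List.flatMap_cons, List.foldl_append, hfd, List.foldl_cons]
    have hstep1 : stepB (res, cur) i0 = (finB (res, cur), some i0) := by
      cases cur with
      | none => simp [stepB, finB]
      | some b =>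
        have h2 : pyDateStr i0 = d := hkey i0 (by rw [hfd]; simp)
        have hbd : pyDateStr i0 ≠ pyDateStr b := by
          rw [h2]
          exact fun h => (hcur b rfl) (h ▸ by simp)
        simp [stepB, finB, hbd]
    rw [hstep1]
    have hgrun : g.foldl stepB (finB (res, cur), some i0)
        = (finB (res, cur), g.foldl bestStep (some i0)) :=
      foldB_group_run g _ i0 (fun it hit => by
        rw [hkey it (by rw [hfd]; simp [hit]), hkey i0 (by rw [hfd]; simp)])
    rw [hgrun]
    obtain ⟨b', hb', hbmem⟩ := foldl_bestStep_some g i0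
    have hbo : bestOf (f d) = some b' := by rw [hfd]; show g.foldl bestStep (some i0) = _; exact hb'
    have hkb' : pyDateStr b' = d := hkey b' (by rw [hfd]; exact hbmem)
    rw [hb']
    have hnodup := List.nodup_cons.mp hD
    rw [ih (finB (res, cur)) (some b') hnodup.2
      (fun d' hd' => hf d' (by simp [hd']))
      (fun b hb => by
        cases hb
        rw [hkb']
        exact hnodup.1)]
    simp [finB, hbo]

theorem key_gsel (data : List (List (String × Option String))) (d : String)
    (hd : d ∈ PySem.Set.ofList (data.filterMap dk)) : pyDateStr (gsel data d) = d := by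
  obtain ⟨it, hit, hdk⟩ := (mem_filterMap_dk _ _).mp ((PySem.Set.mem_ofList _ _).mp hd)
  obtain ⟨b, hb, hbmem⟩ := bestOf_some (data.filter (fun it => dk it == some d))
    (List.ne_nil_of_mem (List.mem_filter.mpr ⟨hit, by simp [hdk]⟩))
  unfold gsel
  rw [hb]
  have hdkb : dk b = some d := by simpa using (List.mem_filter.mp hbmem).2
  exact (dk_eq_some b d hdkb).1

theorem A_characterization (data : List (List (String × Option String))) :
    deduplicate_by_date data
      = (PySem.List.sorted (PySem.Set.ofList (data.filterMap dk)) (fun d : String => d) false).map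
          (fun d => gsel data d) := by
  show PySem.List.sorted (data.foldl stepA PySem.Dict.empty).values (fun x => pyDateStr x) false = _
  have hvals : (data.foldl stepA PySem.Dict.empty).values
      = (PySem.Set.ofList (data.filterMap dk)).map (fun d => gsel data d) := by
    show (data.foldl stepA PySem.Dict.empty).items.map (fun p => p.2) = _
    rw [dictA_items, List.map_map]
    simp [Function.comp_def]
  rw [hvals]
  apply PySem.List.sorted_eq_of_perm_of_pairwise_lt
  · exact (PySem.List.sorted_perm _ _ _).map _
  · rw [List.pairwise_map]
    have hDp := PySem.List.sorted_ofList_pairwise_lt (data.filterMap dk)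
    have hperm := PySem.List.sorted_perm (PySem.Set.ofList (data.filterMap dk)) (fun d : String => d) false
    refine List.Pairwise.imp_of_mem ?_ hDp
    intro a b ha hb hab
    rw [key_gsel data a (hperm.mem_iff.mp ha), key_gsel data b (hperm.mem_iff.mp hb)]
    exact hab

theorem B_characterization (data : List (List (String × Option String))) :
    deduplicate_by_date_alt data
      = (PySem.List.sorted (PySem.Set.ofList (data.filterMap dk)) (fun d : String => d) false).map
          (fun d => gsel data d) := by
  show finB ((PySem.List.sorted (data.filter hasDate) (fun x => pyDateStr x) false).foldl stepB ([], none)) = _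
  rw [sorted_flatMap_groups pyDateStr (data.filter hasDate), ← filterMap_dk]
  have hperm := PySem.List.sorted_perm (PySem.Set.ofList (data.filterMap dk)) (fun d : String => d) false
  have hnodup : (PySem.List.sorted (PySem.Set.ofList (data.filterMap dk)) (fun d : String => d) false).Nodup :=
    hperm.nodup_iff.mpr (PySem.Set.nodup_ofList _)
  have hgrps : ∀ d ∈ PySem.List.sorted (PySem.Set.ofList (data.filterMap dk)) (fun d : String => d) false,
      (data.filter hasDate).filter (fun it => pyDateStr it == d) ≠ []
        ∧ ∀ it ∈ (data.filter hasDate).filter (fun it => pyDateStr it == d), pyDateStr it = d := by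
    intro d hd
    constructor
    · have hd' : d ∈ data.filterMap dk := (PySem.Set.mem_ofList _ _).mp (hperm.mem_iff.mp hd)
      obtain ⟨it, hit, hdk⟩ := List.mem_filterMap.mp hd'
      have h1 : hasDate it = true := by rw [hasDate_eq_isSome, hdk]; rfl
      have h2 : pyDateStr it = d := (dk_eq_some it d hdk).1
      exact List.ne_nil_of_mem (List.mem_filter.mpr ⟨List.mem_filter.mpr ⟨hit, h1⟩, by simp [h2]⟩)
    · intro it hit
      simpa using (List.mem_filter.mp hit).2
  rw [foldB_groups _ _ [] none hnodup hgrps (fun b hb => by cases hb)]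
  show _ ++ _ = _
  rw [show finB ([], none) = [] from rfl, List.nil_append]
  refine List.map_congr_left (fun d hd => ?_)
  have hgroup_eq : (data.filter hasDate).filter (fun it => pyDateStr it == d)
      = data.filter (fun it => dk it == some d) := by
    rw [List.filter_filter]
    refine List.filter_congr (fun it hit => ?_)
    cases hdk : dk it with
    | none =>
      have hh : hasDate it = false := by rw [hasDate_eq_isSome, hdk]; rfl
      simp [hh]
    | some s =>
      have hh : hasDate it = true := by rw [hasDate_eq_isSome, hdk]; rfl
      have hp : pyDateStr it = s := (dk_eq_some it s hdk).1
      simp [hh, hp]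
  rw [hgroup_eq]
  rfl

-- ===== VERDICT (by name: the statement is the Claim_ definition above) =====
theorem deduplicate_by_date_spec : Claim_equal_deduplicate_by_date := by
  intro data _
  unfold Spec_deduplicate_by_date
  rw [A_characterization, B_characterization]
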